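-- pv_equiv track=rewrite | github.com/yishibashi/Competitive_programming | ProjectEuler/01~50/p37.py | r_to_l
-- ===== SOURCE A (Python) =====
-- def r_to_l(primes):
--     ans = []
--     setprimes = set(primes)
--
--     for p in primes:
--         if str(p)[0] != '1' and str(p)[0] != '9':
--             tmp = p
--             while p > 9:
--                 if int(str(p)[:-1]) in setprimes:
--                     p = int(str(p)[:-1])
--                 else:
--                     break
--             if p == 2 or p == 3 or p == 5 or p == 7:
--                 ans.append(tmp)
--         else:
--             pass
--     return ans
-- ===== SOURCE B (Python) =====
-- def r_to_l(primes):
--     # Dynamic programming: process the distinct prime values in increasing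
--     # order; a value is right-truncatable iff its truncation already is.
--     ok = set()
--     for p in sorted(set(primes)):
--         if p <= 9:
--             if p in (2, 3, 5, 7):
--                 ok.add(p)
--         elif p // 10 in ok:
--             ok.add(p)
--     return [p for p in primes if p in ok]
-- ===== Notes on version B (the rewrite author's own statement) =====
-- stated objective: alternative
-- what changed: B replaces A's per-element while-loop that re-walks each prime's whole string-truncation chain with a dynamic-programming table built over the distinct primes in increasing order (one arithmetic p//10 lookup per value) followed by a single membership filter over the input.
import Mathlib
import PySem

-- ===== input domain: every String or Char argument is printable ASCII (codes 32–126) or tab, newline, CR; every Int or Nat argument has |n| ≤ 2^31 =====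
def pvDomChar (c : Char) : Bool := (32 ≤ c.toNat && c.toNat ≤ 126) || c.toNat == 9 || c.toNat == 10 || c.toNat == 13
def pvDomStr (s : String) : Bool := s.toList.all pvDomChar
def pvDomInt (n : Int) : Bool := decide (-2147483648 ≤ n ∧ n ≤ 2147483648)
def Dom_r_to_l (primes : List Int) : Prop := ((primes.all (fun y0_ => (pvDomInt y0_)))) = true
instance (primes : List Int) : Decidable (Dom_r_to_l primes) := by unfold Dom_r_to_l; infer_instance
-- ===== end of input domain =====

-- B changes the algorithm (DP table over increasing values + one filter pass instead of
-- per-element truncation-chain walking); equivalence of return values is proved below.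

-- ===== PORT A =====
-- int(str(p)[:-1]) — the slice of str(p) without its last char, parsed back; inside the
-- loop p > 9 always holds, so str(p)[:-1] is a nonempty digit string and int() never raises
-- (the .getD 0 default is never used).
def pvTruncA (p : Int) : Int :=
  (PySem.Int.ofStr? (PySem.Str.slice (PySem.Int.toStr p) none (some (-1)))).getD 0

-- the 'while p > 9: if int(str(p)[:-1]) in setprimes: p = ... else: break' loop;
-- fuel = number of characters of str(p) bounds the iteration count (each step drops a digit).
def pvWhileA (setprimes : List Int) : Nat → Int → Int
  | 0, p => p
  | fuel + 1, p =>
    if 9 < p then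
      if setprimes.contains (pvTruncA p) then pvWhileA setprimes fuel (pvTruncA p) else p
    else p

def r_to_l (primes : List Int) : List Int :=
  let setprimes := PySem.Set.ofList primes
  primes.foldl (fun ans p =>
    if PySem.Str.pyGet? (PySem.Int.toStr p) 0 ≠ some '1' ∧
       PySem.Str.pyGet? (PySem.Int.toStr p) 0 ≠ some '9' then
      let tmp := p
      let q := pvWhileA setprimes (PySem.Str.len (PySem.Int.toStr p)).toNat p
      if q = 2 ∨ q = 3 ∨ q = 5 ∨ q = 7 then ans ++ [tmp] else ans
    else ans) []

-- ===== PORT B =====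
def pvStepB (ok : PySem.Set Int) (p : Int) : PySem.Set Int :=
  if p ≤ 9 then
    if p = 2 ∨ p = 3 ∨ p = 5 ∨ p = 7 then PySem.Set.add ok p else ok
  else if PySem.Set.contains ok (PySem.Int.floordiv p 10) then PySem.Set.add ok p else ok

def r_to_l_alt (primes : List Int) : List Int :=
  let ok := (PySem.List.sorted (PySem.Set.ofList primes) (fun x => x) false).foldl
    pvStepB PySem.Set.empty
  primes.filter (fun p => PySem.Set.contains ok p)

-- ===== PRECONDITION & SPEC =====
def Spec_r_to_l (primes : List Int) (out : List Int) : Prop := out = r_to_l_alt primes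
instance (primes : List Int) (out : List Int) : Decidable (Spec_r_to_l primes out) := by unfold Spec_r_to_l; infer_instance

-- ===== CLAIM (what is proved, stated in full; the proofs are below) =====
def Claim_equal_r_to_l : Prop := ∀ (primes : List Int), Dom_r_to_l primes → Spec_r_to_l primes (r_to_l primes)

-- ===== LEMMAS AND PROOFS =====

-- ---- integer parsing: a public mirror of ofChars?'s (private) digit scanner ----
def pvGo (cs : List Char) (b : Bool) (a : Nat) : Option Nat :=
  match cs with
  | [] => if b = true then some a else none
  | c :: rest =>
    if c.isDigit = true then pvGo rest true (a * 10 + (c.toNat - '0'.toNat))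
    else
      if c = '_' ∧ b = true then
        match rest with
        | d :: _ => if d.isDigit = true then pvGo rest false a else none
        | [] => none
      else none

def pvDigitsVal? (x : List Char) : Option Nat :=
  match x with
  | [] => none
  | cs => pvGo cs false 0

theorem pvGoExt (f g : List Char → Bool → Nat → Option Nat)
    (h1 : ∀ c cs b a, f (c :: cs) b a =
      if c.isDigit = true then f cs true (a * 10 + (c.toNat - '0'.toNat))
      else
        if c = '_' ∧ b = true then
          match cs with
          | d :: _ => if d.isDigit = true then f cs false a else none
          | [] => none
        else none)
    (h0 : ∀ b a, f [] b a = if b = true then some a else none)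
    (g1 : ∀ c cs b a, g (c :: cs) b a =
      if c.isDigit = true then g cs true (a * 10 + (c.toNat - '0'.toNat))
      else
        if c = '_' ∧ b = true then
          match cs with
          | d :: _ => if d.isDigit = true then g cs false a else none
          | [] => none
        else none)
    (g0 : ∀ b a, g [] b a = if b = true then some a else none) :
    ∀ cs b a, f cs b a = g cs b a := by
  intro cs
  induction cs with
  | nil => intro b a; rw [h0, g0]
  | cons c cs ih =>
    intro b a
    rw [h1, g1]
    by_cases hd : c.isDigit = true
    · simp only [hd, if_true, ih]
    · rw [if_neg hd, if_neg hd]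
      by_cases hu : c = '_' ∧ b = true
      · rw [if_pos hu, if_pos hu]
        cases cs with
        | nil => rfl
        | cons d tl => simp only [ih]
      · rw [if_neg hu, if_neg hu]

theorem pvDValExt (F : List Char → Option Nat) (f : List Char → Bool → Nat → Option Nat)
    (hF : ∀ x, F x = match x with | [] => none | cs => f cs false 0)
    (h1 : ∀ c cs b a, f (c :: cs) b a =
      if c.isDigit = true then f cs true (a * 10 + (c.toNat - '0'.toNat))
      else
        if c = '_' ∧ b = true then
          match cs with
          | d :: _ => if d.isDigit = true then f cs false a else none
          | [] => none
        else none)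
    (h0 : ∀ b a, f [] b a = if b = true then some a else none) :
    ∀ x : List Char, F x = pvDigitsVal? x := by
  intro x
  rw [hF]
  cases x with
  | nil => rfl
  | cons c cs =>
    show f (c :: cs) false 0 = pvGo (c :: cs) false 0
    exact pvGoExt f pvGo h1 h0 (fun _ _ _ _ => rfl) (fun _ _ => rfl) (c :: cs) false 0

theorem pv_isIntSpace_digit (c : Char) (h : c.isDigit = true) : PySem.Int.isIntSpace c = false := by
  simp only [PySem.Int.isIntSpace]
  have n1 : c ≠ ' ' := fun hc => absurd h (by subst hc; decide)
  have n2 : c ≠ '\t' := fun hc => absurd h (by subst hc; decide)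
  have n3 : c ≠ '\n' := fun hc => absurd h (by subst hc; decide)
  have n4 : c ≠ '\x0d' := fun hc => absurd h (by subst hc; decide)
  have n5 : c ≠ '\x0b' := fun hc => absurd h (by subst hc; decide)
  have n6 : c ≠ '\x0c' := fun hc => absurd h (by subst hc; decide)
  simp [n1, n2, n3, n4, n5, n6]

theorem pv_dropWhile_all {p : Char → Bool} : ∀ (l : List Char), (∀ x ∈ l, p x = false) → List.dropWhile p l = l
  | [], _ => rfl
  | c :: cs, h => by rw [List.dropWhile_cons, if_neg]; simp [h c (List.mem_cons_self)]

-- int(s) on a pure-digit string = the value of pvGo's scan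
theorem ofChars?_digits (ds : List Char) (hne : ds ≠ []) (hdig : ∀ c ∈ ds, c.isDigit = true) :
    PySem.Int.ofChars? ds =
      Option.map (fun n => n) ((pvDigitsVal? ds).bind fun a => some ((a : Nat) : Int)) := by
  have hsp : ∀ x ∈ ds, PySem.Int.isIntSpace x = false := fun x hx => pv_isIntSpace_digit x (hdig x hx)
  have h1 : List.dropWhile PySem.Int.isIntSpace ds = ds := pv_dropWhile_all ds hsp
  have h2 : List.dropWhile PySem.Int.isIntSpace ds.reverse = ds.reverse :=
    pv_dropWhile_all _ (fun x hx => hsp x (List.mem_reverse.mp hx))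
  obtain ⟨c, cs, rfl⟩ := List.exists_cons_of_ne_nil hne
  simp only [PySem.Int.ofChars?]
  rw [h1, h2, List.reverse_reverse]
  have hc : c.isDigit = true := hdig c List.mem_cons_self
  split
  · rename_i ds1 heq
    injection heq with e1 e2
    subst e1
    exact absurd hc (by decide)
  · rename_i ds1 heq
    injection heq with e1 e2
    subst e1
    exact absurd hc (by decide)
  · congr 2
    refine pvDValExt _ ?ff ?hF ?hone ?hzero (c :: cs)
    case hF => intro x; rfl
    case hone => intro c' cs' b a; rfl
    case hzero => intro b a; rfl

theorem pvGo_digits : ∀ (cs : List Char), (∀ c ∈ cs, c.isDigit = true) →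
    ∀ (b : Bool) (a : Nat), (b = true ∨ cs ≠ []) →
    pvGo cs b a = some (cs.foldl (fun x c => x * 10 + (c.toNat - 48)) a) := by
  intro cs
  induction cs with
  | nil =>
    intro _ b a hb
    rcases hb with hb | hb
    · subst hb; rfl
    · exact absurd rfl hb
  | cons c cs ih =>
    intro hdig b a _
    have hc : c.isDigit = true := hdig c List.mem_cons_self
    have hstep : pvGo (c :: cs) b a = pvGo cs true (a * 10 + (c.toNat - 48)) := by
      conv_lhs => rw [pvGo.eq_def]
      simp [hc]
    rw [hstep]
    exact ih (fun x hx => hdig x (List.mem_cons_of_mem _ hx)) true _ (Or.inl rfl)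

-- ---- Nat.toDigits structure ----
theorem pvTDC_acc (b : Nat) : ∀ (f n : Nat) (l : List Char),
    Nat.toDigitsCore b f n l = Nat.toDigitsCore b f n [] ++ l := by
  intro f
  induction f with
  | zero => intro n l; simp [Nat.toDigitsCore]
  | succ f ih =>
    intro n l
    simp only [Nat.toDigitsCore]
    by_cases h : n / b = 0
    · simp [h]
    · rw [if_neg h, if_neg h, ih _ (_ :: l), ih _ [_]]
      simp

theorem pvTDC_fuel (n : Nat) : ∀ (f f' : Nat), n < f → n < f' →
    Nat.toDigitsCore 10 f n [] = Nat.toDigitsCore 10 f' n [] := by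
  induction n using Nat.strong_induction_on with
  | _ n ih =>
    intro f f' hf hf'
    obtain ⟨g, rfl⟩ : ∃ g, f = g + 1 := ⟨f - 1, by omega⟩
    obtain ⟨g', rfl⟩ : ∃ g', f' = g' + 1 := ⟨f' - 1, by omega⟩
    simp only [Nat.toDigitsCore]
    by_cases h : n / 10 = 0
    · simp [h]
    · rw [if_neg h, if_neg h, pvTDC_acc, pvTDC_acc 10 g']
      have hlt : n / 10 < n := Nat.div_lt_self (by omega) (by omega)
      rw [ih (n / 10) hlt g g' (by omega) (by omega)]

theorem pvTD_single (n : Nat) (h : n < 10) : Nat.toDigits 10 n = [Nat.digitChar n] := by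
  simp only [Nat.toDigits, Nat.toDigitsCore]
  have h0 : n / 10 = 0 := Nat.div_eq_of_lt h
  have hm : n % 10 = n := Nat.mod_eq_of_lt h
  simp [h0, hm]

theorem pvTD_append (n : Nat) (h : 10 ≤ n) :
    Nat.toDigits 10 n = Nat.toDigits 10 (n / 10) ++ [Nat.digitChar (n % 10)] := by
  simp only [Nat.toDigits]
  show Nat.toDigitsCore 10 (n + 1) n [] = _
  simp only [Nat.toDigitsCore]
  have h0 : ¬ n / 10 = 0 := by omega
  rw [if_neg h0, pvTDC_acc]
  congr 1
  exact pvTDC_fuel (n / 10) n (n / 10 + 1) (by omega) (by omega)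

theorem pvDigitChar_isDigit (d : Nat) (h : d < 10) : (Nat.digitChar d).isDigit = true := by
  interval_cases d <;> decide

theorem pvDigitChar_val (d : Nat) (h : d < 10) : (Nat.digitChar d).toNat - 48 = d := by
  interval_cases d <;> decide

theorem pvTD_all_digits (n : Nat) : ∀ c ∈ Nat.toDigits 10 n, c.isDigit = true := by
  induction n using Nat.strong_induction_on with
  | _ n ih =>
    by_cases h : n < 10
    · rw [pvTD_single n h]
      intro c hc
      rw [List.mem_singleton] at hc
      subst hc
      exact pvDigitChar_isDigit n h
    · rw [pvTD_append n (by omega)]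
      intro c hc
      rcases List.mem_append.mp hc with hc | hc
      · exact ih (n / 10) (Nat.div_lt_self (by omega) (by omega)) c hc
      · rw [List.mem_singleton] at hc
        subst hc
        exact pvDigitChar_isDigit _ (Nat.mod_lt _ (by omega))

theorem pvTD_ne_nil (n : Nat) : Nat.toDigits 10 n ≠ [] := by
  by_cases h : n < 10
  · rw [pvTD_single n h]; simp
  · rw [pvTD_append n (by omega)]; simp

theorem pvTD_lt (n : Nat) : n < 10 ^ (Nat.toDigits 10 n).length := by
  induction n using Nat.strong_induction_on with
  | _ n ih =>
    by_cases h : n < 10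
    · rw [pvTD_single n h]; simpa using h
    · rw [pvTD_append n (by omega)]
      have := ih (n / 10) (Nat.div_lt_self (by omega) (by omega))
      rw [List.length_append, List.length_singleton, pow_succ]
      omega

theorem pvTD_foldl (n : Nat) : ∀ (a : Nat),
    (Nat.toDigits 10 n).foldl (fun x c => x * 10 + (c.toNat - 48)) a =
      a * 10 ^ (Nat.toDigits 10 n).length + n := by
  induction n using Nat.strong_induction_on with
  | _ n ih =>
    intro a
    by_cases h : n < 10
    · rw [pvTD_single n h]
      simp [pvDigitChar_val n h]
    · rw [pvTD_append n (by omega), List.foldl_append]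
      rw [ih (n / 10) (Nat.div_lt_self (by omega) (by omega)) a]
      simp only [List.foldl_cons, List.foldl_nil]
      rw [pvDigitChar_val _ (Nat.mod_lt _ (by omega))]
      rw [List.length_append, List.length_singleton, pow_succ]
      have : n % 10 + 10 * (n / 10) = n := Nat.mod_add_div n 10
      ring_nf
      omega

-- int(str-of-digits) roundtrip
theorem pv_roundtrip (n : Nat) : PySem.Int.ofChars? (Nat.toDigits 10 n) = some ((n : Nat) : Int) := by
  have hdig := pvTD_all_digits n
  have hne := pvTD_ne_nil n
  rw [ofChars?_digits _ hne hdig]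
  have : pvDigitsVal? (Nat.toDigits 10 n) = some n := by
    obtain ⟨c, cs, he⟩ := List.exists_cons_of_ne_nil hne
    rw [he]
    show pvGo (c :: cs) false 0 = some n
    rw [← he, pvGo_digits _ hdig false 0 (Or.inr hne), pvTD_foldl n 0]
    simp
  rw [this]
  rfl

-- ---- bridging A's string operations to arithmetic ----
theorem pv_toChars_nonneg (p : Int) (h : 0 ≤ p) :
    PySem.Int.toChars p = Nat.toDigits 10 p.toNat := by
  simp only [PySem.Int.toChars]
  rw [if_neg (by omega)]

theorem pvTruncA_eq (p : Int) (h : 9 < p) : pvTruncA p = p / 10 := by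
  have hn : p.toNat ≥ 10 := by omega
  unfold pvTruncA
  simp only [PySem.Int.ofStr?]
  rw [PySem.Str.slice_to_neg_one, PySem.Int.toList_toStr, pv_toChars_nonneg p (by omega)]
  rw [pvTD_append p.toNat hn, List.dropLast_concat]
  rw [pv_roundtrip]
  have : ((p.toNat / 10 : Nat) : Int) = p / 10 := by omega
  rw [this]
  rfl

-- head character of str(p) for good values
theorem pv_head_toDigits (n : Nat) (h : 10 ≤ n) :
    (Nat.toDigits 10 n).head? = (Nat.toDigits 10 (n / 10)).head? := by
  rw [pvTD_append n h]
  exact List.head?_append_of_ne_nil _ (pvTD_ne_nil _)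

-- ---- the mathematical acceptance predicate ----
def pvGood (S : List Int) (p : Int) : Bool :=
  if h : p ≤ 9 then decide (p = 2 ∨ p = 3 ∨ p = 5 ∨ p = 7)
  else S.contains (p / 10) && pvGood S (p / 10)
  termination_by p.toNat
  decreasing_by
    simp only [not_le] at h
    omega

theorem pvGood_le9 (S : List Int) (p : Int) (h : p ≤ 9) :
    pvGood S p = decide (p = 2 ∨ p = 3 ∨ p = 5 ∨ p = 7) := by
  rw [pvGood]; rw [dif_pos h]

theorem pvGood_gt9 (S : List Int) (p : Int) (h : ¬ p ≤ 9) :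
    pvGood S p = (S.contains (p / 10) && pvGood S (p / 10)) := by
  rw [pvGood]; rw [dif_neg h]

-- good values have head char in {'2','3','5','7'}
theorem pv_good_head (S : List Int) (p : Int) (h : pvGood S p = true) :
    (PySem.Int.toChars p).head? = some '2' ∨ (PySem.Int.toChars p).head? = some '3' ∨
    (PySem.Int.toChars p).head? = some '5' ∨ (PySem.Int.toChars p).head? = some '7' := by
  induction p using pvGood.induct with
  | case1 p hle =>
    rw [pvGood_le9 S p hle, decide_eq_true_eq] at h
    rcases h with rfl | rfl | rfl | rfl
    · left; decide
    · right; left; decide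
    · right; right; left; decide
    · right; right; right; decide
  | case2 p hle ih =>
    rw [pvGood_gt9 S p hle, Bool.and_eq_true] at h
    have hgt : 9 < p := by omega
    have h1 : (PySem.Int.toChars p).head? = (PySem.Int.toChars (p / 10)).head? := by
      rw [pv_toChars_nonneg p (by omega), pv_toChars_nonneg (p / 10) (by omega)]
      have ht : (p / 10).toNat = p.toNat / 10 := by omega
      rw [ht]
      exact pv_head_toDigits p.toNat (by omega)
    rw [h1]
    exact ih h.2

-- the while loop agrees with pvGood
theorem pv_while_spec (S : List Int) : ∀ (fuel : Nat) (p : Int), (9 < p → p.toNat < 10 ^ fuel) →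
    decide (pvWhileA S fuel p = 2 ∨ pvWhileA S fuel p = 3 ∨ pvWhileA S fuel p = 5 ∨ pvWhileA S fuel p = 7)
      = pvGood S p := by
  intro fuel
  induction fuel with
  | zero =>
    intro p h
    by_cases hp : 9 < p
    · exact absurd (h hp) (by omega)
    · show decide (p = 2 ∨ p = 3 ∨ p = 5 ∨ p = 7) = _
      rw [pvGood_le9 S p (by omega)]
  | succ fuel ih =>
    intro p h
    have hw : pvWhileA S (fuel + 1) p =
        if 9 < p then (if S.contains (pvTruncA p) = true then pvWhileA S fuel (pvTruncA p) else p) else p := rfl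
    by_cases hp : 9 < p
    · have htr : pvTruncA p = p / 10 := pvTruncA_eq p hp
      simp only [hw, if_pos hp, htr]
      rw [pvGood_gt9 S p (by omega)]
      by_cases hc : S.contains (p / 10) = true
      · simp only [hc, if_pos trivial, Bool.true_and]
        apply ih
        intro h10
        have key : ∀ (q : Int) (B : Nat), 9 < q → q.toNat < B * 10 → (q / 10).toNat < B := by
          intro q B h1 h2; omega
        exact key p _ hp (by rw [← pow_succ]; exact h hp)
      · simp only [hc, Bool.false_and, Bool.false_eq_true, if_false]
        rw [decide_eq_false]
        omega
    · simp only [hw, if_neg hp]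
      rw [pvGood_le9 S p (by omega)]

-- A is the filter by pvGood
theorem pv_head_ne (p : Int) (S : List Int) (hg : pvGood S p = true) :
    PySem.Str.pyGet? (PySem.Int.toStr p) 0 ≠ some '1' ∧
    PySem.Str.pyGet? (PySem.Int.toStr p) 0 ≠ some '9' := by
  have hget : PySem.Str.pyGet? (PySem.Int.toStr p) 0 = (PySem.Int.toChars p).head? := by
    show PySem.Chars.pyGet? (PySem.Int.toStr p).toList 0 = _
    show PySem.List.pyGet? (PySem.Int.toStr p).toList 0 = _
    rw [PySem.Int.toList_toStr, PySem.List.pyGet?_zero]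
    exact List.head?_eq_getElem?.symm
  have hh := pv_good_head S p hg
  constructor <;> (rw [hget]; rcases hh with h | h | h | h <;> rw [h] <;> decide)

theorem pv_fuel_ok (p : Int) (h10 : 9 < p) :
    p.toNat < 10 ^ (PySem.Str.len (PySem.Int.toStr p)).toNat := by
  have hl : (PySem.Str.len (PySem.Int.toStr p)).toNat = (PySem.Int.toChars p).length := by
    rw [PySem.Str.len_eq, PySem.Int.toList_toStr]
    omega
  rw [hl, pv_toChars_nonneg p (by omega)]
  exact pvTD_lt p.toNat

theorem pv_A_filter (primes : List Int) :
    r_to_l primes = primes.filter (fun p => pvGood (PySem.Set.ofList primes) p) := by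
  have hstep : ∀ (acc : List Int) (p : Int),
      (if PySem.Str.pyGet? (PySem.Int.toStr p) 0 ≠ some '1' ∧
          PySem.Str.pyGet? (PySem.Int.toStr p) 0 ≠ some '9' then
        if pvWhileA (PySem.Set.ofList primes) (PySem.Str.len (PySem.Int.toStr p)).toNat p = 2 ∨
           pvWhileA (PySem.Set.ofList primes) (PySem.Str.len (PySem.Int.toStr p)).toNat p = 3 ∨
           pvWhileA (PySem.Set.ofList primes) (PySem.Str.len (PySem.Int.toStr p)).toNat p = 5 ∨
           pvWhileA (PySem.Set.ofList primes) (PySem.Str.len (PySem.Int.toStr p)).toNat p = 7 then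
          acc ++ [p]
        else acc
      else acc)
      = (if pvGood (PySem.Set.ofList primes) p = true then acc ++ [p] else acc) := by
    intro acc p
    have hq := pv_while_spec (PySem.Set.ofList primes) (PySem.Str.len (PySem.Int.toStr p)).toNat p
      (fun h10 => pv_fuel_ok p h10)
    by_cases hg : pvGood (PySem.Set.ofList primes) p = true
    · rw [hg] at hq
      rw [if_pos (pv_head_ne p _ hg), if_pos (of_decide_eq_true hq), if_pos hg]
    · have hgf : pvGood (PySem.Set.ofList primes) p = false := by
        revert hg; cases pvGood (PySem.Set.ofList primes) p <;> simp
      rw [hgf] at hq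
      have hnq := of_decide_eq_false hq
      rw [if_neg hg]
      by_cases hA : PySem.Str.pyGet? (PySem.Int.toStr p) 0 ≠ some '1' ∧
          PySem.Str.pyGet? (PySem.Int.toStr p) 0 ≠ some '9'
      · rw [if_pos hA, if_neg hnq]
      · rw [if_neg hA]
  have h1 : r_to_l primes = primes.foldl (fun acc p =>
      if PySem.Str.pyGet? (PySem.Int.toStr p) 0 ≠ some '1' ∧
         PySem.Str.pyGet? (PySem.Int.toStr p) 0 ≠ some '9' then
        if pvWhileA (PySem.Set.ofList primes) (PySem.Str.len (PySem.Int.toStr p)).toNat p = 2 ∨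
           pvWhileA (PySem.Set.ofList primes) (PySem.Str.len (PySem.Int.toStr p)).toNat p = 3 ∨
           pvWhileA (PySem.Set.ofList primes) (PySem.Str.len (PySem.Int.toStr p)).toNat p = 5 ∨
           pvWhileA (PySem.Set.ofList primes) (PySem.Str.len (PySem.Int.toStr p)).toNat p = 7 then
          acc ++ [p]
        else acc
      else acc) [] := rfl
  rw [h1]
  refine (PySem.List.foldl_congr_mem primes _
    (fun acc p => if pvGood (PySem.Set.ofList primes) p = true then acc ++ [p] else acc) []
    (fun acc x _ => hstep acc x)).trans ?_
  rw [PySem.List.foldl_append_ite_eq_filter]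
  simp

-- B's fold builds exactly the pvGood-accepted subset of S
theorem pv_contains_mem (s : PySem.Set Int) (x : Int) : (PySem.Set.contains s x = true) ↔ x ∈ s := by
  simp [PySem.Set.contains]

theorem pv_stepB_good (S ok : List Int) (p : Int) (rest : List Int)
    (hok : ∀ v : Int, (PySem.Set.contains ok v = true) ↔ (v ∈ S ∧ pvGood S v = true ∧ ∀ u ∈ p :: rest, v < u))
    (hplt : ∀ u ∈ rest, p < u) :
    pvStepB ok p = if pvGood S p = true then PySem.Set.add ok p else ok := by
  rw [pvStepB]
  by_cases h9 : p ≤ 9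
  · rw [if_pos h9, pvGood_le9 S p h9]
    by_cases h4 : p = 2 ∨ p = 3 ∨ p = 5 ∨ p = 7
    · simp [h4]
    · simp [h4]
  · rw [if_neg h9, pvGood_gt9 S p h9,
      PySem.Int.floordiv_eq_ediv_of_pos (by norm_num : (0:Int) < 10)]
    have hlt10 : p / 10 < p := by omega
    by_cases hc : PySem.Set.contains ok (p / 10) = true
    · rw [if_pos hc]
      obtain ⟨hs, hg, _⟩ := (hok _).mp hc
      have hcs : S.contains (p / 10) = true := List.contains_iff_mem.mpr hs
      rw [if_pos (by rw [hcs, hg]; rfl)]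
    · rw [if_neg hc]
      by_cases hgp : (S.contains (p / 10) && pvGood S (p / 10)) = true
      · exfalso
        rw [Bool.and_eq_true] at hgp
        apply hc
        rw [hok]
        refine ⟨List.contains_iff_mem.mp hgp.1, hgp.2, fun u hu => ?_⟩
        rcases List.mem_cons.mp hu with rfl | hu
        · exact hlt10
        · exact lt_trans hlt10 (hplt u hu)
      · rw [if_neg hgp]

theorem pv_B_inv (S : List Int) : ∀ (suf : List Int) (ok : List Int),
    suf.Pairwise (· < ·) →
    (∀ v ∈ suf, v ∈ S) →
    (∀ v : Int, v ∈ S → v ∉ suf → ∀ u ∈ suf, v < u) →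
    (∀ v : Int, (PySem.Set.contains ok v = true) ↔ (v ∈ S ∧ pvGood S v = true ∧ ∀ u ∈ suf, v < u)) →
    ∀ v : Int, (PySem.Set.contains (suf.foldl pvStepB ok) v = true) ↔ (v ∈ S ∧ pvGood S v = true) := by
  intro suf
  induction suf with
  | nil =>
    intro ok _ _ _ hok v
    simp only [List.foldl_nil]
    rw [hok v]
    simp
  | cons p rest ih =>
    intro ok hpw hmem hcomp hok v
    obtain ⟨hplt, hrpw⟩ := List.pairwise_cons.mp hpw
    simp only [List.foldl_cons]
    refine ih (pvStepB ok p) hrpw (fun w hw => hmem w (List.mem_cons_of_mem _ hw)) ?_ ?_ v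
    · intro w hwS hw_nin u hu
      by_cases hwp : w = p
      · subst hwp; exact hplt u hu
      · refine hcomp w hwS ?_ u (List.mem_cons_of_mem _ hu)
        intro hmem'
        rcases List.mem_cons.mp hmem' with rfl | h'
        · exact hwp rfl
        · exact hw_nin h'
    · intro w
      rw [pv_stepB_good S ok p rest hok hplt]
      have hnotin : w ∈ S → pvGood S w = true → (∀ u ∈ rest, w < u) → w ≠ p → w < p := by
        intro hs hg hlt hwp
        refine hcomp w hs ?_ p List.mem_cons_self
        intro hmem'
        rcases List.mem_cons.mp hmem' with rfl | h'
        · exact hwp rfl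
        · exact absurd (hlt w h') (lt_irrefl w)
      by_cases hgp : pvGood S p = true
      · rw [if_pos hgp, pv_contains_mem, PySem.Set.mem_add, ← pv_contains_mem, hok w]
        constructor
        · rintro (⟨hs, hg, hlt⟩ | rfl)
          · exact ⟨hs, hg, fun u hu => hlt u (List.mem_cons_of_mem _ hu)⟩
          · exact ⟨hmem _ List.mem_cons_self, hgp, hplt⟩
        · rintro ⟨hs, hg, hlt⟩
          by_cases hwp : w = p
          · exact Or.inr hwp
          · refine Or.inl ⟨hs, hg, fun u hu => ?_⟩
            rcases List.mem_cons.mp hu with rfl | hu'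
            · exact hnotin hs hg hlt hwp
            · exact hlt u hu'
      · rw [if_neg hgp, hok w]
        constructor
        · rintro ⟨hs, hg, hlt⟩
          exact ⟨hs, hg, fun u hu => hlt u (List.mem_cons_of_mem _ hu)⟩
        · rintro ⟨hs, hg, hlt⟩
          have hwp : w ≠ p := by rintro rfl; exact hgp hg
          refine ⟨hs, hg, fun u hu => ?_⟩
          rcases List.mem_cons.mp hu with rfl | hu'
          · exact hnotin hs hg hlt hwp
          · exact hlt u hu'

theorem pv_B_filter (primes : List Int) :
    r_to_l_alt primes = primes.filter (fun p => pvGood (PySem.Set.ofList primes) p) := by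
  have hpw : (PySem.List.sorted (PySem.Set.ofList primes) (fun x => x) false).Pairwise (· < ·) :=
    PySem.List.sorted_ofList_pairwise_lt primes
  have hperm : (PySem.List.sorted (PySem.Set.ofList primes) (fun x => x) false).Perm
      (PySem.Set.ofList primes) := PySem.List.sorted_perm _ _ _
  have hfin := pv_B_inv (PySem.Set.ofList primes)
    (PySem.List.sorted (PySem.Set.ofList primes) (fun x => x) false) PySem.Set.empty
    hpw (fun v hv => hperm.mem_iff.mp hv)
    (fun v hv hnin _ _ => absurd (hperm.mem_iff.mpr hv) hnin)
    (fun v => by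
      constructor
      · intro h
        exact absurd h (by simp [PySem.Set.contains, PySem.Set.empty])
      · rintro ⟨hs, _, hlt⟩
        exact absurd (hlt v (hperm.mem_iff.mpr hs)) (lt_irrefl v))
  show primes.filter _ = _
  apply List.filter_congr
  intro x hx
  have hxS : x ∈ PySem.Set.ofList primes := (PySem.Set.mem_ofList primes x).mpr hx
  rw [Bool.eq_iff_iff, hfin x]
  constructor
  · rintro ⟨_, hg⟩; exact hg
  · intro hg; exact ⟨hxS, hg⟩

-- ===== VERDICT (by name: the statement is the Claim_ definition above) =====
theorem r_to_l_spec : Claim_equal_r_to_l := by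
  intro primes _
  unfold Spec_r_to_l
  rw [pv_A_filter, pv_B_filter]
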